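-- pv_equiv track=rewrite | github.com/czarkos/ser1de | scripts/proto_generator.py | generate_only_string_setters
-- ===== SOURCE A (Python) =====
-- def generate_only_string_setters(num_lines, num_strings=1, nestness_depth=1, nestness_width=1, has_string=False):
--     def gen(ctx, level, msg_name, width_level=0):
--         if has_string:
--             ctx += '\t\t{'
--             ctx += f' // DEPTH = {level}, WIDTH = {width_level}\n'
--             for i in range(num_strings):
--                 #ctx += f'\t\tstd::string dummy_str{i}(\"a\", sizes_for_scatter[i][{i}+1]);\n'
--                 #ctx += f'\t\t{msg_name}->set_f{num_lines + i + 1}(dummy_str{i});\n'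
--                 ctx += f'\t\t{msg_name}->set_f{num_lines + i + 1}(dummy_str);\n'
--             ctx += '\t\t}\n'
--
--         # DFS
--         if level == nestness_depth:
--             return ctx
--         for i in range(nestness_width):
--             if has_string:
--                 ctx = gen(ctx, level + 1, msg_name + f'->mutable_f{num_lines + num_strings + 1 + i}()', i)
--             else:
--                 ctx = gen(ctx, level + 1, msg_name + f'->mutable_f{num_lines + 1 + i}()')
--         return ctx
--
--     return gen("", 1, '(&out_messages[i])')
-- ===== SOURCE B (Python) =====
-- def generate_only_string_setters(num_lines, num_strings=1, nestness_depth=1, nestness_width=1, has_string=False):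
--     if not has_string:
--         return ""
--     parts = []
--     stack = [(1, '(&out_messages[i])', 0)]
--     while stack:
--         level, msg_name, width_level = stack.pop()
--         block = '\t\t{' + f' // DEPTH = {level}, WIDTH = {width_level}\n'
--         for i in range(num_strings):
--             block += f'\t\t{msg_name}->set_f{num_lines + i + 1}(dummy_str);\n'
--         block += '\t\t}\n'
--         parts.append(block)
--         if level != nestness_depth:
--             for i in reversed(range(nestness_width)):
--                 stack.append((level + 1, msg_name + f'->mutable_f{num_lines + num_strings + 1 + i}()', i))
--     return ''.join(parts)
-- ===== Notes on version B (the rewrite author's own statement) =====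
-- stated objective: alternative
-- what changed: Replaces the recursive ctx-threading DFS with an explicit stack-based pre-order traversal that collects each node's block into a list of parts joined at the end (children pushed in reverse so pop order matches), with an early return of '' when has_string is false.
import Mathlib
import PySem

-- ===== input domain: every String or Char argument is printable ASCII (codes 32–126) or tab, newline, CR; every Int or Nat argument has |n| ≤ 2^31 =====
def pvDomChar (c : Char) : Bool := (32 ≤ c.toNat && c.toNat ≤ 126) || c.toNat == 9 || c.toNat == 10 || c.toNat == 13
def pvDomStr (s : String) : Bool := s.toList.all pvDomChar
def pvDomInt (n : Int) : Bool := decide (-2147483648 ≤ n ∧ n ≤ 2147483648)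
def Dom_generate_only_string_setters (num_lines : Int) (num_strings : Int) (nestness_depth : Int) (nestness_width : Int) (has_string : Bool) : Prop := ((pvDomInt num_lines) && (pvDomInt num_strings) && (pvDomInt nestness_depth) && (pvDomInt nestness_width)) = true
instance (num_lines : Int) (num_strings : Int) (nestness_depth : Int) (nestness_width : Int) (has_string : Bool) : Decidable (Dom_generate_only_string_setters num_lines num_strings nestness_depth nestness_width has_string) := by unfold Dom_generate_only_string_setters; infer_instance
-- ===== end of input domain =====

-- B replaces the recursive ctx-threading DFS with an explicit stack-based pre-order
-- traversal collecting per-node blocks into a list joined at the end (objective: alternative).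

-- ===== PORT A =====

-- shared block text: '\t\t{ // DEPTH = …\n' + the per-string setter lines + '\t\t}\n'
-- (both Pythons build exactly these lines; A appends them onto ctx, B builds them standalone)
def pvBlock (num_lines num_strings : Int) (level : Int) (msg : String) (wl : Int) : String :=
  ((PySem.List.pyRange 0 num_strings 1).foldl
      (fun c i => c ++ ("\t\t" ++ msg ++ "->set_f" ++ PySem.Int.toStr (num_lines + i + 1) ++ "(dummy_str);\n"))
      ("\t\t{" ++ (" // DEPTH = " ++ PySem.Int.toStr level ++ ", WIDTH = " ++ PySem.Int.toStr wl ++ "\n")))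
    ++ "\t\t}\n"

-- A's inner `gen`, fuel = remaining recursion depth; the fuel-0 fallback is reached under
-- Pre_ only with an empty child loop, where it returns exactly what Python returns.
def pvGenA (nl ns depth width : Int) (hs : Bool) : Nat → String → Int → String → Int → String
  | fuel, ctx, level, msg, wl =>
    let ctx1 := if hs then ctx ++ pvBlock nl ns level msg wl else ctx
    if level == depth then ctx1
    else
      match fuel with
      | 0 => ctx1
      | f+1 =>
        (PySem.List.pyRange 0 width 1).foldl
          (fun c i =>
            if hs then
              pvGenA nl ns depth width hs f c (level+1)
                (msg ++ ("->mutable_f" ++ PySem.Int.toStr (nl + ns + 1 + i) ++ "()")) i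
            else
              pvGenA nl ns depth width hs f c (level+1)
                (msg ++ ("->mutable_f" ++ PySem.Int.toStr (nl + 1 + i) ++ "()")) 0)
          ctx1

def generate_only_string_setters (num_lines : Int) (num_strings : Int) (nestness_depth : Int) (nestness_width : Int) (has_string : Bool) : String :=
  pvGenA num_lines num_strings nestness_depth nestness_width has_string
    (nestness_depth - 1).toNat "" 1 "(&out_messages[i])" 0

-- ===== PORT B =====

-- the while-stack loop of Source B; stack head = top; fuel = one unit per popped frame
def pvRunB (nl ns depth width : Int) : Nat → List (Int × String × Int) → List String → List String
  | _, [], parts => parts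
  | 0, _, parts => parts
  | f+1, (level, msg, wl) :: rest, parts =>
    let block := pvBlock nl ns level msg wl
    let parts' := parts ++ [block]
    let stack' :=
      if level == depth then rest
      else
        ((PySem.List.pyRange 0 width 1).reverse).foldl
          (fun st i => (level + 1, msg ++ ("->mutable_f" ++ PySem.Int.toStr (nl + ns + 1 + i) ++ "()"), i) :: st)
          rest
    pvRunB nl ns depth width f stack' parts'

def generate_only_string_setters_alt (num_lines : Int) (num_strings : Int) (nestness_depth : Int) (nestness_width : Int) (has_string : Bool) : String :=
  if !has_string then ""
  else
    String.join
      (pvRunB num_lines num_strings nestness_depth nestness_width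
        ((nestness_width.toNat + 1) ^ nestness_depth.toNat)
        [(1, "(&out_messages[i])", 0)] [])

-- ===== PRECONDITION & SPEC =====
-- Pre_ excludes exactly the inputs (nestness_depth < 1 with nestness_width ≥ 1) on which the
-- Python A recurses forever and dies with RecursionError (B's loop diverges there too).
def Pre_generate_only_string_setters (num_lines : Int) (num_strings : Int) (nestness_depth : Int) (nestness_width : Int) (has_string : Bool) : Prop :=
  1 ≤ nestness_depth ∨ nestness_width < 1
instance (num_lines : Int) (num_strings : Int) (nestness_depth : Int) (nestness_width : Int) (has_string : Bool) : Decidable (Pre_generate_only_string_setters num_lines num_strings nestness_depth nestness_width has_string) := by unfold Pre_generate_only_string_setters; infer_instance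

def pvWitness_generate_only_string_setters : Int × Int × Int × Int × Bool := (2, 1, 2, 2, true)

def Spec_generate_only_string_setters (num_lines : Int) (num_strings : Int) (nestness_depth : Int) (nestness_width : Int) (has_string : Bool) (out : String) : Prop := out = generate_only_string_setters_alt num_lines num_strings nestness_depth nestness_width has_string
instance (num_lines : Int) (num_strings : Int) (nestness_depth : Int) (nestness_width : Int) (has_string : Bool) (out : String) : Decidable (Spec_generate_only_string_setters num_lines num_strings nestness_depth nestness_width has_string out) := by unfold Spec_generate_only_string_setters; infer_instance

-- ===== CLAIM (what is proved, stated in full; the proofs are below) =====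
def Claim_equal_generate_only_string_setters : Prop := ∀ (num_lines : Int) (num_strings : Int) (nestness_depth : Int) (nestness_width : Int) (has_string : Bool), Dom_generate_only_string_setters num_lines num_strings nestness_depth nestness_width has_string → Pre_generate_only_string_setters num_lines num_strings nestness_depth nestness_width has_string → Spec_generate_only_string_setters num_lines num_strings nestness_depth nestness_width has_string (generate_only_string_setters num_lines num_strings nestness_depth nestness_width has_string)

-- ===== LEMMAS AND PROOFS =====

theorem pv_append_foldl (l : List String) (a : String) :
    l.foldl (· ++ ·) a = a ++ l.foldl (· ++ ·) "" := by
  induction l generalizing a with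
  | nil => simp
  | cons x xs ih => simp only [List.foldl]; rw [ih (a ++ x), ih ("" ++ x)]; simp [String.append_assoc]

theorem pv_join_nil : String.join ([] : List String) = "" := rfl

theorem pv_join_cons (x : String) (l : List String) : String.join (x :: l) = x ++ String.join l := by
  simp only [String.join, List.foldl]
  rw [show (fun (r s : String) => r ++ s) = (· ++ ·) from rfl, pv_append_foldl]
  simp

theorem pv_foldl_join (xs : List Int) (c : String) (F : String → Int → String) (g : Int → String)
    (h : ∀ c i, F c i = c ++ g i) : xs.foldl F c = c ++ String.join (xs.map g) := by
  induction xs generalizing c with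
  | nil => simp [pv_join_nil]
  | cons x xs ih => rw [List.foldl_cons, h, ih, List.map_cons, pv_join_cons, String.append_assoc]

theorem pv_join_append (a b : List String) :
    String.join (a ++ b) = String.join a ++ String.join b := by
  induction a with
  | nil => simp [pv_join_nil]
  | cons x xs ih => simp [pv_join_cons, ih, String.append_assoc]

theorem pv_foldl_cons_rev {α β : Type} (f : α → β) (xs : List α) (rest : List β) :
    (xs.reverse).foldl (fun st i => f i :: st) rest = xs.map f ++ rest := by
  induction xs generalizing rest with
  | nil => simp
  | cons x xs ih => simp [List.foldl_append, ih]

theorem pv_map_const_sum (l : List Int) (c : Nat) : (l.map (fun _ => c)).sum = l.length * c := by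
  induction l with
  | nil => simp
  | cons x xs ih => simp [ih]; ring

-- prefix invariance of A's gen: ctx is only ever appended to
theorem pvGenA_prefix (nl ns d w : Int) (hs : Bool) :
    ∀ (fuel : Nat) (level : Int) (msg : String) (wl : Int) (ctx : String),
    pvGenA nl ns d w hs fuel ctx level msg wl = ctx ++ pvGenA nl ns d w hs fuel "" level msg wl := by
  intro fuel
  induction fuel with
  | zero =>
    intro level msg wl ctx
    cases hs <;> (by_cases hl : (level == d) = true <;> simp [pvGenA, hl, String.append_assoc])
  | succ f ih =>
    intro level msg wl ctx
    by_cases hl : (level == d) = true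
    · cases hs <;> simp [pvGenA, hl, String.append_assoc]
    · cases hs with
      | false =>
        simp only [pvGenA, hl, Bool.false_eq_true, if_false, eq_self_iff_true, if_true]
        rw [pv_foldl_join _ _ _
              (fun i => pvGenA nl ns d w false f "" (level+1)
                (msg ++ ("->mutable_f" ++ PySem.Int.toStr (nl + 1 + i) ++ "()")) 0)
              (fun c i => ih (level+1) _ 0 c),
            pv_foldl_join _ _ _
              (fun i => pvGenA nl ns d w false f "" (level+1)
                (msg ++ ("->mutable_f" ++ PySem.Int.toStr (nl + 1 + i) ++ "()")) 0)
              (fun c i => ih (level+1) _ 0 c)]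
        simp [String.append_assoc]
      | true =>
        simp only [pvGenA, hl, Bool.false_eq_true, if_false, eq_self_iff_true, if_true]
        rw [pv_foldl_join _ _ _
              (fun i => pvGenA nl ns d w true f "" (level+1)
                (msg ++ ("->mutable_f" ++ PySem.Int.toStr (nl + ns + 1 + i) ++ "()")) i)
              (fun c i => ih (level+1) _ i c),
            pv_foldl_join _ _ _
              (fun i => pvGenA nl ns d w true f "" (level+1)
                (msg ++ ("->mutable_f" ++ PySem.Int.toStr (nl + ns + 1 + i) ++ "()")) i)
              (fun c i => ih (level+1) _ i c)]
        simp [String.append_assoc]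

theorem pv_join_map_empty (xs : List Int) : String.join (xs.map (fun _ => "")) = "" := by
  induction xs with
  | nil => rfl
  | cons x xs ih => rw [List.map_cons, pv_join_cons, ih]; simp

theorem pvGenA_false (nl ns d w : Int) :
    ∀ (fuel : Nat) (level : Int) (msg : String) (wl : Int) (ctx : String),
    pvGenA nl ns d w false fuel ctx level msg wl = ctx := by
  intro fuel
  induction fuel with
  | zero => intro level msg wl ctx; simp only [pvGenA]; split <;> rfl
  | succ f ih =>
    intro level msg wl ctx
    by_cases hl : (level == d) = true
    · simp [pvGenA, hl]
    · simp only [pvGenA, hl, Bool.false_eq_true, if_false, eq_self_iff_true, if_true]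
      rw [pv_foldl_join _ _ _ (fun _ => "") (by intro c i; simp [ih]), pv_join_map_empty]
      simp

-- number of nodes in a subtree with remaining depth k
def pvNodes (w : Nat) : Nat → Nat
  | 0 => 1
  | k+1 => 1 + w * pvNodes w k

theorem pvNodes_pos (w : Nat) : ∀ k, 1 ≤ pvNodes w k
  | 0 => le_refl 1
  | k+1 => by simp [pvNodes]

theorem pvNodes_le_pow (w : Nat) : ∀ k, pvNodes w k ≤ (w + 1) ^ (k + 1) := by
  intro k
  induction k with
  | zero => simp [pvNodes]
  | succ k ih =>
    have h1 : 1 ≤ (w + 1) ^ (k + 1) := Nat.one_le_pow _ _ (Nat.succ_pos w)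
    calc pvNodes w (k+1) = 1 + w * pvNodes w k := rfl
      _ ≤ 1 + w * (w + 1) ^ (k + 1) := Nat.add_le_add_left (Nat.mul_le_mul_left w ih) 1
      _ ≤ (w + 1) ^ (k + 1) + w * (w + 1) ^ (k + 1) := Nat.add_le_add_right h1 _
      _ = (w + 1) ^ (k + 2) := by ring

def pvFrameOut (nl ns d w : Int) (fr : Int × String × Int) : String :=
  pvGenA nl ns d w true ((d - fr.1).toNat) "" fr.1 fr.2.1 fr.2.2

def pvTotal (d w : Int) (frames : List (Int × String × Int)) : Nat :=
  (frames.map (fun fr => pvNodes w.toNat ((d - fr.1).toNat))).sum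

-- one-step unfolding of A's subtree output at an internal node (hs = true)
theorem pvGenA_step (nl ns d w : Int) (k : Nat) (level : Int) (msg : String) (wl : Int)
    (hne : (level == d) = false) :
    pvGenA nl ns d w true (k+1) "" level msg wl =
      pvBlock nl ns level msg wl ++
        String.join ((PySem.List.pyRange 0 w 1).map
          (fun i => pvGenA nl ns d w true k "" (level+1)
            (msg ++ ("->mutable_f" ++ PySem.Int.toStr (nl + ns + 1 + i) ++ "()")) i)) := by
  conv_lhs => rw [pvGenA]
  simp only [hne, Bool.false_eq_true, if_false, eq_self_iff_true, if_true]
  rw [pv_foldl_join _ _ _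
      (fun i => pvGenA nl ns d w true k "" (level+1)
        (msg ++ ("->mutable_f" ++ PySem.Int.toStr (nl + ns + 1 + i) ++ "()")) i)
      (fun c i => pvGenA_prefix nl ns d w true k (level+1) _ i c)]
  simp

-- the stack machine computes the concatenation of the subtree outputs of its frames
theorem pvRunB_spec (nl ns d w : Int) :
    ∀ (bfuel : Nat) (frames : List (Int × String × Int)) (parts : List String),
    (∀ fr ∈ frames, 1 ≤ fr.1 ∧ fr.1 ≤ d) →
    pvTotal d w frames ≤ bfuel →
    String.join (pvRunB nl ns d w bfuel frames parts) =
      String.join parts ++ String.join (frames.map (pvFrameOut nl ns d w)) := by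
  intro bfuel
  induction bfuel with
  | zero =>
    intro frames parts hinv hfuel
    cases frames with
    | nil => simp [pvRunB, pv_join_nil]
    | cons fr rest =>
      exfalso
      have := pvNodes_pos w.toNat ((d - fr.1).toNat)
      simp [pvTotal] at hfuel
      omega
  | succ b ih =>
    intro frames parts hinv hfuel
    cases frames with
    | nil => simp [pvRunB, pv_join_nil]
    | cons fr rest =>
      obtain ⟨level, msg, wl⟩ := fr
      have hlev := hinv _ (List.mem_cons_self ..)
      simp only at hlev
      by_cases hl : (level == d) = true
      · -- leaf frame
        have hk : (d - level).toNat = 0 := by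
          have : level = d := by simpa using hl
          omega
        simp only [pvRunB, hl, if_true]
        rw [ih rest (parts ++ [pvBlock nl ns level msg wl])
            (fun fr h => hinv fr (List.mem_cons_of_mem _ h))
            (by
              have := pvNodes_pos w.toNat ((d - level).toNat)
              simp [pvTotal] at hfuel ⊢; omega)]
        have hout : pvFrameOut nl ns d w (level, msg, wl) = pvBlock nl ns level msg wl := by
          simp only [pvFrameOut, hk, pvGenA, hl, if_true]
          simp
        simp [pv_join_append, pv_join_cons, pv_join_nil, hout, String.append_assoc]
      · -- internal frame
        have hlt : level < d := by
          have : ¬ level = d := by simpa using hl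
          omega
        obtain ⟨k, hk⟩ : ∃ k, (d - level).toNat = k + 1 := ⟨(d - level).toNat - 1, by omega⟩
        have hk' : (d - (level + 1)).toNat = k := by omega
        simp only [pvRunB, hl, Bool.false_eq_true, if_false]
        set child : Int → Int × String × Int :=
          fun i => (level + 1, msg ++ ("->mutable_f" ++ PySem.Int.toStr (nl + ns + 1 + i) ++ "()"), i) with hchild
        rw [pv_foldl_cons_rev child]
        have hw0 : (w - 0).toNat = w.toNat := by omega
        have hchildsum :
            (((PySem.List.pyRange 0 w 1).map child).map
              (fun fr => pvNodes w.toNat ((d - fr.1).toNat))).sum = w.toNat * pvNodes w.toNat k := by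
          rw [List.map_map]
          have hcongr : ((PySem.List.pyRange 0 w 1).map
              ((fun fr => pvNodes w.toNat ((d - fr.1).toNat)) ∘ child)) =
              (PySem.List.pyRange 0 w 1).map (fun _ => pvNodes w.toNat k) := by
            apply List.map_congr_left; intro i _; simp [hchild, hk']
          rw [hcongr, pv_map_const_sum, PySem.List.length_pyRange_one, hw0, Nat.mul_comm]
        rw [ih ((PySem.List.pyRange 0 w 1).map child ++ rest) (parts ++ [pvBlock nl ns level msg wl])
            (by
              intro fr h
              rcases List.mem_append.mp h with h | h
              · obtain ⟨i, _, rfl⟩ := List.mem_map.mp h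
                simp only [hchild]
                constructor <;> omega
              · exact hinv fr (List.mem_cons_of_mem _ h))
            (by
              have hnodes : pvNodes w.toNat (k+1) = 1 + w.toNat * pvNodes w.toNat k := rfl
              simp only [pvTotal, List.map_cons, List.sum_cons, hk] at hfuel
              simp only [pvTotal, List.map_append, List.sum_append]
              rw [hchildsum]
              omega)]
        have hout : pvFrameOut nl ns d w (level, msg, wl) =
            pvBlock nl ns level msg wl ++
              String.join (((PySem.List.pyRange 0 w 1).map child).map (pvFrameOut nl ns d w)) := by
          simp only [pvFrameOut, hk]
          rw [pvGenA_step nl ns d w k level msg wl (by simpa using hl)]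
          congr 1
          rw [List.map_map]
          apply congrArg
          apply List.map_congr_left
          intro i _
          simp [hchild, pvFrameOut, hk']
        simp [pv_join_append, pv_join_cons, pv_join_nil, hout, String.append_assoc]

-- ===== VERDICT (by name: the statement is the Claim_ definition above) =====
theorem generate_only_string_setters_spec : Claim_equal_generate_only_string_setters := by
  intro nl ns d w hs _ hpre
  unfold Spec_generate_only_string_setters
  unfold generate_only_string_setters generate_only_string_setters_alt
  cases hs with
  | false => simp [pvGenA_false]
  | true =>
    simp only [Bool.not_true, Bool.false_eq_true, if_false]
    by_cases hd : 1 ≤ d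
    · -- main case: depth ≥ 1, the root frame satisfies the stack invariant
      rw [pvRunB_spec nl ns d w _ _ _
          (by intro fr h; simp at h; subst h; exact ⟨le_refl 1, hd⟩)
          (by
            have h1 : pvTotal d w [(1, "(&out_messages[i])", 0)] = pvNodes w.toNat ((d-1).toNat) := by
              simp [pvTotal]
            have h2 := pvNodes_le_pow w.toNat ((d-1).toNat)
            have h3 : (d - 1).toNat + 1 = d.toNat := by omega
            rw [h1]; rw [h3] at h2; exact h2)]
      simp [pvFrameOut, pv_join_cons, pv_join_nil]
    · -- degenerate case: depth < 1 forces width < 1 by Pre_; single-node output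
      have hw : w < 1 := by
        rcases hpre with h | h
        · omega
        · exact h
      have hrange : PySem.List.pyRange 0 w 1 = [] := by
        rw [PySem.List.pyRange_one]
        have h0 : (w - 0).toNat = 0 := by omega
        rw [h0]
        rfl
      have hne : ((1 : Int) == d) = false := by
        simp only [beq_eq_false_iff_ne, ne_eq]
        omega
      have hwnat : w.toNat = 0 := by omega
      have hdnat : d.toNat = 0 := by omega
      have hfuel : (w.toNat + 1) ^ d.toNat = 1 := by simp [hwnat, hdnat]
      rw [hfuel]
      have hA : pvGenA nl ns d w true ((d-1).toNat) "" 1 "(&out_messages[i])" 0 =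
          pvBlock nl ns 1 "(&out_messages[i])" 0 := by
        have hk : (d - 1).toNat = 0 := by omega
        rw [hk, pvGenA]
        simp [hne]
      rw [hA]
      simp [pvRunB, hne, hrange, pv_join_cons, pv_join_nil]
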